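-- pv_equiv track=rewrite | github.com/davidmzeng/beat-the-landlord | beat_the_landlord.py | sorted_cards
-- ===== SOURCE A (Python) =====
-- RANK_ORDER = ("3", "4", "5", "6", "7", "8", "9", "10", "J", "Q", "K", "A", "2", "B", "R")
--
-- def sorted_cards(cards):
--     """
--     Takes cards as an argument and returns a new group of sorted cards
--     """
--     for card in cards: # check for invalid cards
--         if card not in RANK_ORDER:
--             raise ValueError("invalid card found")
--     sorted_result = []
--     for rank in RANK_ORDER: # iterate in sorted order
--         for card in cards:
--             if card == rank:
--                 sorted_result.append(card)
--     return sorted_result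
-- ===== SOURCE B (Python) =====
-- RANK_ORDER = ("3", "4", "5", "6", "7", "8", "9", "10", "J", "Q", "K", "A", "2", "B", "R")
--
-- def sorted_cards(cards):
--     for card in cards:  # check for invalid cards (must precede the sort)
--         if card not in RANK_ORDER:
--             raise ValueError("invalid card found")
--     pos = {r: i for i, r in enumerate(RANK_ORDER)}
--     return sorted(cards, key=pos.__getitem__)
-- ===== Notes on version B (the rewrite author's own statement) =====
-- stated objective: idiomatic
-- what changed: Replaces the nested bucket scan (for each of the 15 ranks, rescan all cards) with one stable sorted() over the cards keyed by a precomputed rank->index table; validation stays first so invalid cards still raise ValueError.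
import Mathlib
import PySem

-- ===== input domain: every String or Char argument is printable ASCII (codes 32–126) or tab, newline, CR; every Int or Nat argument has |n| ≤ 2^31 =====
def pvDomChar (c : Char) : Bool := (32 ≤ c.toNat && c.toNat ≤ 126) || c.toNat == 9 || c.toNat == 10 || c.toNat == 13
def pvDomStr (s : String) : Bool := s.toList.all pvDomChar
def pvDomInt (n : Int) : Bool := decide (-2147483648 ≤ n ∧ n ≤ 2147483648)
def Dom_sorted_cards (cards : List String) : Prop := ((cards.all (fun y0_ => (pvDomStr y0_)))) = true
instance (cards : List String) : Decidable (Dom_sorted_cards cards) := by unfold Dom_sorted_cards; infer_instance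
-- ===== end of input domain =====

-- B replaces A's nested per-rank rescans with one stable sort keyed by a precomputed
-- rank-index table (idiomatic); equivalence is about the return value on valid hands.

def RANK_ORDER : List String :=
  ["3", "4", "5", "6", "7", "8", "9", "10", "J", "Q", "K", "A", "2", "B", "R"]

-- ===== PORT A =====
-- the validation loop raises ValueError on invalid cards; those inputs are outside Pre_
def sorted_cards (cards : List String) : List String :=
  RANK_ORDER.foldl
    (fun sorted_result rank =>
      cards.foldl (fun acc card => if card == rank then acc ++ [card] else acc) sorted_result)
    []

-- ===== PORT B =====
-- pos = {r: i for i, r in enumerate(RANK_ORDER)}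
def rankPos : PySem.Dict String Int :=
  (PySem.List.enumerate RANK_ORDER 0).foldl (fun d p => PySem.Dict.insert d p.2 p.1) PySem.Dict.empty

-- pos.__getitem__; under Pre_ every card is a key of pos, so the .getD 0 default is never used
def rankKey (c : String) : Int := (PySem.Dict.get? rankPos c).getD 0

-- B: validate (ValueError outside Pre_), then sorted(cards, key=pos.__getitem__)
def sorted_cards_alt (cards : List String) : List String :=
  PySem.List.sorted cards rankKey false

-- ===== PRECONDITION & SPEC =====
-- exactly the inputs where A returns: any invalid card makes A raise ValueError (B too)
def Pre_sorted_cards (cards : List String) : Prop := ∀ c ∈ cards, c ∈ RANK_ORDER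
instance (cards : List String) : Decidable (Pre_sorted_cards cards) := by
  unfold Pre_sorted_cards; infer_instance

def pvWitness_sorted_cards : List String := ["A", "3", "10", "A", "R"]

def Spec_sorted_cards (cards : List String) (out : List String) : Prop := out = sorted_cards_alt cards
instance (cards : List String) (out : List String) : Decidable (Spec_sorted_cards cards out) := by
  unfold Spec_sorted_cards; infer_instance

-- ===== CLAIM (what is proved, stated in full; the proofs are below) =====
def Claim_equal_sorted_cards : Prop := ∀ (cards : List String), Dom_sorted_cards cards → Pre_sorted_cards cards → Spec_sorted_cards cards (sorted_cards cards)

-- ===== LEMMAS AND PROOFS =====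

-- concatenation of the per-rank buckets, in rank order (the shape of A's result)
def buckets (rs xs : List String) : List String :=
  rs.flatMap (fun r => xs.filter (fun c => c == r))

theorem buckets_nil (rs : List String) : buckets rs [] = [] := by
  simp [buckets]

theorem buckets_append_not_mem (rs xs : List String) (x : String) (hx : x ∉ rs) :
    buckets rs (xs ++ [x]) = buckets rs xs := by
  induction rs with
  | nil => rfl
  | cons r rs ih =>
    have hxr : (x == r) = false := by
      simp only [beq_eq_false_iff_ne]; intro h; exact hx (h ▸ List.mem_cons_self)
    simp only [buckets, List.flatMap_cons, List.filter_append, List.filter_cons,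
      List.filter_nil, hxr] at *
    rw [ih (fun h => hx (List.mem_cons_of_mem _ h))]
    simp

theorem insertBy_skip_append (before : String → String → Bool) (x : String)
    (F R : List String) (hF : ∀ f ∈ F, before x f = false) :
    PySem.List.insertBy before x (F ++ R) = F ++ PySem.List.insertBy before x R := by
  induction F with
  | nil => rfl
  | cons f F ih =>
    have hf : before x f = false := hF f List.mem_cons_self
    simp [PySem.List.insertBy, hf, ih (fun g hg => hF g (List.mem_cons_of_mem _ hg))]

theorem insertBy_head_before (before : String → String → Bool) (x : String)
    (ys : List String) (h : ∀ y ∈ ys, before x y = true) :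
    PySem.List.insertBy before x ys = x :: ys := by
  cases ys with
  | nil => rfl
  | cons y ys => simp [PySem.List.insertBy, h y List.mem_cons_self]

theorem mem_buckets_key (rs xs : List String) (c : String) (hc : c ∈ buckets rs xs) :
    ∃ r ∈ rs, c = r := by
  simp only [buckets, List.mem_flatMap, List.mem_filter] at hc
  obtain ⟨r, hr, _, hcr⟩ := hc
  exact ⟨r, hr, by simpa using hcr⟩

theorem insert_buckets (key : String → Int) (rs : List String)
    (hp : rs.Pairwise (fun a b => key a < key b)) (x : String) (hx : x ∈ rs)
    (xs : List String) :
    PySem.List.insertBy (fun a b => decide (key a < key b)) x (buckets rs xs)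
      = buckets rs (xs ++ [x]) := by
  induction rs with
  | nil => cases hx
  | cons r rs ih =>
    have hlt : ∀ b ∈ rs, key r < key b := (List.pairwise_cons.mp hp).1
    have hp' := (List.pairwise_cons.mp hp).2
    have hbsplit : buckets (r :: rs) xs
        = xs.filter (fun c => c == r) ++ buckets rs xs := by
      simp [buckets]
    by_cases hxr : x = r
    · subst hxr
      have hxnotin : x ∉ rs := fun h => lt_irrefl _ (hlt x h)
      have hF : ∀ f ∈ xs.filter (fun c => c == x),
          (fun a b => decide (key a < key b)) x f = false := by
        intro f hf
        have : f = x := by simpa using (List.mem_filter.mp hf).2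
        simp [this]
      have hR : ∀ y ∈ buckets rs xs,
          (fun a b => decide (key a < key b)) x y = true := by
        intro y hy
        obtain ⟨r', hr', hyr⟩ := mem_buckets_key rs xs y hy
        subst hyr
        simpa using hlt y hr'
      rw [hbsplit, insertBy_skip_append _ _ _ _ hF, insertBy_head_before _ _ _ hR]
      have h1 : buckets (x :: rs) (xs ++ [x])
          = (xs ++ [x]).filter (fun c => c == x) ++ buckets rs (xs ++ [x]) := by
        simp [buckets]
      rw [h1, buckets_append_not_mem rs xs x hxnotin, List.filter_append]
      simp
    · have hxrs : x ∈ rs := by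
        cases hx with
        | head => exact absurd rfl hxr
        | tail _ h => exact h
      have hF : ∀ f ∈ xs.filter (fun c => c == r),
          (fun a b => decide (key a < key b)) x f = false := by
        intro f hf
        have hfr : f = r := by simpa using (List.mem_filter.mp hf).2
        subst hfr
        simp [not_lt.mpr (le_of_lt (hlt x hxrs))]
      rw [hbsplit, insertBy_skip_append _ _ _ _ hF, ih hp' hxrs]
      have h1 : buckets (r :: rs) (xs ++ [x])
          = (xs ++ [x]).filter (fun c => c == r) ++ buckets rs (xs ++ [x]) := by
        simp [buckets]
      rw [h1, List.filter_append]
      simp [hxr]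

theorem sorted_eq_buckets (key : String → Int) (rs : List String)
    (hp : rs.Pairwise (fun a b => key a < key b)) (xs : List String)
    (hxs : ∀ c ∈ xs, c ∈ rs) :
    PySem.List.sorted xs key false = buckets rs xs := by
  induction xs using List.reverseRecOn with
  | nil => rw [buckets_nil]; rfl
  | append_singleton xs x ih =>
    rw [PySem.List.sorted_eq_foldl_insertBy, List.foldl_append, List.foldl_cons,
      List.foldl_nil, ← PySem.List.sorted_eq_foldl_insertBy,
      ih (fun c hc => hxs c (List.mem_append_left _ hc)),
      insert_buckets key rs hp x (hxs x (List.mem_append_right _ List.mem_cons_self))]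

theorem sorted_cards_eq_buckets (cards : List String) :
    sorted_cards cards = buckets RANK_ORDER cards := by
  unfold sorted_cards buckets
  have hinner : ∀ (acc : List String) (rank : String),
      cards.foldl (fun acc card => if card == rank then acc ++ [card] else acc) acc
        = acc ++ cards.filter (fun c => c == rank) := by
    intro acc rank
    exact PySem.List.foldl_append_if_eq_filter (fun c => c == rank) cards acc
  calc RANK_ORDER.foldl
        (fun sorted_result rank =>
          cards.foldl (fun acc card => if card == rank then acc ++ [card] else acc)
            sorted_result) []
      = RANK_ORDER.foldl
          (fun acc rank => acc ++ cards.filter (fun c => c == rank)) [] := by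
        apply PySem.List.foldl_congr_mem
        intro acc rank _
        exact hinner acc rank
    _ = [] ++ RANK_ORDER.flatMap (fun r => cards.filter (fun c => c == r)) :=
        PySem.List.foldl_append_eq_flatMap _ _ _
    _ = RANK_ORDER.flatMap (fun r => cards.filter (fun c => c == r)) := List.nil_append _

theorem rank_keys : RANK_ORDER.map rankKey
    = [0, 1, 2, 3, 4, 5, 6, 7, 8, 9, 10, 11, 12, 13, 14] := rfl

theorem rank_pairwise : RANK_ORDER.Pairwise (fun a b => rankKey a < rankKey b) := by
  have h : (RANK_ORDER.map rankKey).Pairwise (fun a b => a < b) := by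
    rw [rank_keys]; decide
  exact List.pairwise_map.mp h

-- ===== VERDICT (by name: the statement is the Claim_ definition above) =====
theorem sorted_cards_spec : Claim_equal_sorted_cards := by
  intro cards _ hpre
  unfold Spec_sorted_cards sorted_cards_alt
  rw [sorted_cards_eq_buckets, sorted_eq_buckets rankKey RANK_ORDER rank_pairwise cards hpre]
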